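-- pv_equiv track=rewrite | github.com/muditbhartia/Olympic_Predictions | Predictor/predictor.py | rearrangeRatio
-- ===== SOURCE A (Python) =====
-- def rearrangeRatio(ratio):
-- 	regionData = {}
-- 	for year in ratio:
-- 		for region in ratio[year]:
-- 			if region in regionData:
-- 				tempRegion = regionData[region]
-- 			else:
-- 				tempRegion = {}
--
-- 			tempRegion[year] = ratio[year][region]
-- 			regionData[region] = tempRegion
-- 	return regionData
-- ===== SOURCE B (Python) =====
-- def rearrangeRatio(ratio):
-- 	items = list(ratio.items())
-- 	regions = dict.fromkeys(r for _, d in items for r in d)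
-- 	return {r: {y: d[r] for y, d in items if r in d} for r in regions}
-- ===== Notes on version B (the rewrite author's own statement) =====
-- stated objective: alternative
-- what changed: A makes one pass over (year, region) entries mutating a dict-of-dicts; B first collects the distinct regions in first-seen order (dict.fromkeys) and then builds each region's inner year dict by an independent scan over the years that contain it.
import Mathlib
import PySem

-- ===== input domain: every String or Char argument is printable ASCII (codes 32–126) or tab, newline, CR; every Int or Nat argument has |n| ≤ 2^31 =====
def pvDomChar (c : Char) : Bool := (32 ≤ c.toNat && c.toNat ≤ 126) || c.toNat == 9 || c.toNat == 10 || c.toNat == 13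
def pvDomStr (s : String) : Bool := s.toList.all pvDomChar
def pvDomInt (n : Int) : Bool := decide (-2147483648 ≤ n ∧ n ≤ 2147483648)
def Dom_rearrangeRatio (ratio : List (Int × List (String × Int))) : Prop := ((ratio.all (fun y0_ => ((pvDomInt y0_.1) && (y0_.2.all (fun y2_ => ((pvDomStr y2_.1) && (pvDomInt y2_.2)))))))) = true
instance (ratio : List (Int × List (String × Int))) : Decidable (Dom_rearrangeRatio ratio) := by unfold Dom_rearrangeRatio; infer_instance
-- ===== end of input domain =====

-- B transposes the year→region dict region-first (distinct regions in first-seen order,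
-- then a per-region scan over the years) instead of A's single mutating pass; alternative decomposition, not faster.

-- ===== PORT A =====
def rearrangeRatio (ratio : List (Int × List (String × Int))) : List (String × List (Int × Int)) :=
  let regionData : PySem.Dict String (PySem.Dict Int Int) :=
    ratio.foldl
      (fun d p =>
        p.2.foldl
          (fun d q =>
            -- tempRegion = regionData[region] if present else {};  tempRegion[year] = ratio[year][region];  regionData[region] = tempRegion
            d.insert q.1 ((d.getD q.1 PySem.Dict.empty).insert p.1 q.2))
          d)
      PySem.Dict.empty
  regionData.items.map (fun r => (r.1, r.2.items))

-- ===== PORT B =====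
def rearrangeRatio_alt (ratio : List (Int × List (String × Int))) : List (String × List (Int × Int)) :=
  let regions : List String := PySem.List.dedup (ratio.flatMap (fun p => p.2.map Prod.fst))
  regions.map (fun r => (r, ratio.filterMap (fun p => (p.2.lookup r).map (fun v => (p.1, v)))))

-- ===== PRECONDITION & SPEC =====
-- Pre_ excludes association lists with a duplicate outer year key or a duplicate region key inside one
-- year: those lists do not represent any Python dict (A's argument is a dict, whose keys are unique),
-- so the dict semantics of such an input is ambiguous.
def Pre_rearrangeRatio (ratio : List (Int × List (String × Int))) : Prop :=
  (ratio.map Prod.fst).Nodup ∧ ∀ p ∈ ratio, (p.2.map Prod.fst).Nodup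
instance (ratio : List (Int × List (String × Int))) : Decidable (Pre_rearrangeRatio ratio) := by
  unfold Pre_rearrangeRatio; infer_instance
def pvWitness_rearrangeRatio : (List (Int × List (String × Int))) :=
  [(2000, [("USA", 5), ("GER", 3)]), (2004, [("GER", 7)])]

def Spec_rearrangeRatio (ratio : List (Int × List (String × Int))) (out : List (String × List (Int × Int))) : Prop := out = rearrangeRatio_alt ratio
instance (ratio : List (Int × List (String × Int))) (out : List (String × List (Int × Int))) : Decidable (Spec_rearrangeRatio ratio out) := by unfold Spec_rearrangeRatio; infer_instance

-- ===== CLAIM (what is proved, stated in full; the proofs are below) =====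
def Claim_equal_rearrangeRatio : Prop := ∀ (ratio : List (Int × List (String × Int))), Dom_rearrangeRatio ratio → Pre_rearrangeRatio ratio → Spec_rearrangeRatio ratio (rearrangeRatio ratio)

-- ===== LEMMAS AND PROOFS =====

-- the flattened (year, region, value) triples of the input
def pvTriples (ratio : List (Int × List (String × Int))) : List (Int × String × Int) :=
  ratio.flatMap (fun p => p.2.map (fun q => (p.1, q.1, q.2)))

-- one step of A's loop, on a triple
def pvStep (d : PySem.Dict String (PySem.Dict Int Int)) (t : Int × String × Int) :
    PySem.Dict String (PySem.Dict Int Int) :=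
  d.insert t.2.1 ((d.getD t.2.1 PySem.Dict.empty).insert t.1 t.2.2)

lemma pv_fold_eq (ratio : List (Int × List (String × Int))) :
    ratio.foldl
      (fun d p => p.2.foldl (fun d q => d.insert q.1 ((d.getD q.1 PySem.Dict.empty).insert p.1 q.2)) d)
      PySem.Dict.empty
    = (pvTriples ratio).foldl pvStep PySem.Dict.empty := by
  rw [pvTriples, List.foldl_flatMap]
  simp [List.foldl_map, pvStep]

lemma pv_getD_fold (ts : List (Int × String × Int)) (r : String)
    (d : PySem.Dict String (PySem.Dict Int Int)) :
    (ts.foldl pvStep d).getD r PySem.Dict.empty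
    = (ts.filter (fun t => t.2.1 == r)).foldl (fun inn t => inn.insert t.1 t.2.2)
        (d.getD r PySem.Dict.empty) := by
  induction ts generalizing d with
  | nil => rfl
  | cons t ts ih =>
    by_cases h : t.2.1 = r
    · simp [List.foldl_cons, ih, pvStep, h]
    · simp [List.foldl_cons, ih, pvStep, h, PySem.Dict.getD_insert, Ne.symm h]

lemma pv_filter_map_pairs (y : Int) (r : String) (l : List (String × Int))
    (h : (l.map Prod.fst).Nodup) :
    ((l.map (fun q => (y, q.1, q.2))).filter (fun t => t.2.1 == r))
    = ((l.lookup r).map (fun v => (y, r, v))).toList := by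
  induction l with
  | nil => rfl
  | cons q l ih =>
    obtain ⟨s, v⟩ := q
    simp only [List.map_cons, List.nodup_cons] at h
    by_cases hq : s = r
    · subst hq
      have hnil : (l.map (fun q' => (y, q'.1, q'.2))).filter (fun t => t.2.1 == s) = [] := by
        rw [List.filter_eq_nil_iff]
        intro t ht
        simp only [List.mem_map] at ht
        obtain ⟨q', hq', rfl⟩ := ht
        simp only [beq_iff_eq]
        intro he
        exact h.1 (he ▸ List.mem_map_of_mem hq')
      simp [hnil]
    · have hb : (r == s) = false := beq_eq_false_iff_ne.mpr (Ne.symm hq)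
      simp [List.lookup, hq, hb, ih h.2]

lemma pv_filter_triples (ratio : List (Int × List (String × Int))) (r : String)
    (h : ∀ p ∈ ratio, (p.2.map Prod.fst).Nodup) :
    (pvTriples ratio).filter (fun t => t.2.1 == r)
    = ratio.filterMap (fun p => (p.2.lookup r).map (fun v => (p.1, r, v))) := by
  induction ratio with
  | nil => rfl
  | cons p ratio ih =>
    rw [pvTriples, List.flatMap_cons, List.filter_append, ← pvTriples,
      ih (fun q hq => h q (List.mem_cons_of_mem _ hq)),
      pv_filter_map_pairs p.1 r p.2 (h p (List.mem_cons_self))]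
    cases hl : p.2.lookup r <;> simp [hl]

lemma pv_filterMap_sublist {α β : Type} (l : List α) (g : α → Option β) (f : α → β)
    (h : ∀ a : α, ∀ b ∈ g a, b = f a) : (l.filterMap g).Sublist (l.map f) := by
  induction l with
  | nil => simp
  | cons a l ih =>
    rw [List.filterMap_cons, List.map_cons]
    cases hg : g a with
    | none => exact ih.cons _
    | some b => rw [h a b (hg ▸ rfl)]; exact ih.cons₂ _

lemma pv_main (ratio : List (Int × List (String × Int))) (hpre : Pre_rearrangeRatio ratio) :
    rearrangeRatio ratio = rearrangeRatio_alt ratio := by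
  obtain ⟨hy, hr⟩ := hpre
  rw [rearrangeRatio, rearrangeRatio_alt, pv_fold_eq]
  unfold pvStep
  have hknd : ((pvTriples ratio).foldl
      (fun d (t : Int × String × Int) =>
        d.insert t.2.1 ((d.getD t.2.1 PySem.Dict.empty).insert t.1 t.2.2))
      PySem.Dict.empty).keys.Nodup :=
    PySem.Dict.nodup_keys_foldl_insert_key (pvTriples ratio) (fun t => t.2.1)
      (fun d t => (d.getD t.2.1 PySem.Dict.empty).insert t.1 t.2.2) PySem.Dict.empty
      (by simp [PySem.Dict.keys_empty])
  rw [PySem.Dict.items_eq_map_keys _ hknd PySem.Dict.empty, List.map_map]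
  rw [PySem.Dict.keys_foldl_insert_key (pvTriples ratio) (fun t => t.2.1)
      (fun d t => (d.getD t.2.1 PySem.Dict.empty).insert t.1 t.2.2) PySem.Dict.empty]
  have hkeys : PySem.Set.update (PySem.Dict.empty
        (κ := String) (ν := PySem.Dict Int Int)).keys ((pvTriples ratio).map (fun t => t.2.1))
      = PySem.List.dedup (ratio.flatMap (fun p => p.2.map Prod.fst)) := by
    simp [PySem.Dict.keys_empty, PySem.Set.update_nil_left, pvTriples, List.map_flatMap,
      List.map_map, Function.comp_def]
  rw [hkeys]
  apply List.map_congr_left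
  intro r _
  simp only [Function.comp_apply]
  refine congrArg (Prod.mk r) ?_
  rw [show (fun d (t : Int × String × Int) =>
        d.insert t.2.1 ((d.getD t.2.1 PySem.Dict.empty).insert t.1 t.2.2)) = pvStep from rfl,
    pv_getD_fold, PySem.Dict.getD_empty, pv_filter_triples ratio r hr]
  have hnd : ((ratio.filterMap (fun p => (p.2.lookup r).map (fun v => (p.1, r, v)))).map
      (fun t => t.1)).Nodup := by
    refine hy.sublist ?_
    rw [List.map_filterMap]
    exact pv_filterMap_sublist ratio _ Prod.fst (by
      intro p b hb
      simp only [Option.map_map, Option.mem_def, Option.map_eq_some_iff] at hb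
      obtain ⟨w, _, rfl⟩ := hb
      rfl)
  have hfresh := PySem.Dict.items_foldl_insert_fresh
    (ratio.filterMap (fun p => (p.2.lookup r).map (fun v => (p.1, r, v))))
    (fun t => t.1) (fun t => t.2.2) PySem.Dict.empty
    (fun a _ => PySem.Dict.contains_empty _) hnd
  rw [hfresh]
  simp only [List.map_filterMap, Option.map_map, Function.comp_def]
  rfl

-- ===== VERDICT (by name: the statement is the Claim_ definition above) =====
theorem rearrangeRatio_spec : Claim_equal_rearrangeRatio := by
  intro ratio _ hpre
  unfold Spec_rearrangeRatio
  exact pv_main ratio hpre
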